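-- pv_equiv track=rewrite | github.com/TRO-Wolf/iceberg-rust | iceberg-spark-python/iceberg_spark/catalog_ops.py | _parse_set_clause
-- ===== SOURCE A (Python) =====
-- def _split_at_commas(text: str) -> list[str]:
--     """Split text by commas, respecting parentheses and string quotes."""
--     parts: list[str] = []
--     depth = 0
--     in_quote: str | None = None
--     current = ""
--     for ch in text:
--         if in_quote:
--             current += ch
--             if ch == in_quote:
--                 in_quote = None
--             continue
--         if ch in ("'", '"'):
--             in_quote = ch
--             current += ch
--             continue
--         if ch == "(":
--             depth += 1
--         elif ch == ")":
--             depth -= 1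
--         if ch == "," and depth == 0:
--             parts.append(current.strip())
--             current = ""
--         else:
--             current += ch
--     if current.strip():
--         parts.append(current.strip())
--     return parts
--
-- def _parse_set_clause(set_str: str) -> list[tuple[str, str]]:
--     """Parse 'col1 = expr1, col2 = expr2' into [(col1, expr1), (col2, expr2)].
--
--     Handles commas inside parentheses (function calls) and string literals.
--     """
--     result = []
--     for pair in _split_at_commas(set_str):
--         eq_idx = pair.index("=")
--         col = pair[:eq_idx].strip()
--         expr = pair[eq_idx + 1:].strip()
--         result.append((col, expr))
--     return result
-- ===== SOURCE B (Python) =====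
-- def _parse_set_clause(set_str: str) -> list[tuple[str, str]]:
--     """Parse 'col1 = expr1, col2 = expr2' into [(col1, expr1), (col2, expr2)].
--
--     Single pass: characters are routed into a col buffer until the first
--     top-priority '=' of the segment, then into an expr buffer; a pair is
--     flushed at each top-level comma and at end of input.  Commas inside
--     parentheses and string literals are left alone.
--     """
--     result: list[tuple[str, str]] = []
--     col: list[str] = []
--     expr: list[str] = []
--     seen_eq = False
--     depth = 0
--     in_quote: str | None = None
--
--     def put(ch: str) -> None:
--         nonlocal seen_eq
--         if not seen_eq and ch == "=":
--             seen_eq = True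
--         elif seen_eq:
--             expr.append(ch)
--         else:
--             col.append(ch)
--
--     def flush() -> None:
--         nonlocal seen_eq
--         if not seen_eq:
--             raise ValueError(
--                 f"SET clause assignment has no '=': {''.join(col).strip()!r}"
--             )
--         result.append(("".join(col).strip(), "".join(expr).strip()))
--         col.clear()
--         expr.clear()
--         seen_eq = False
--
--     for ch in set_str:
--         if in_quote is not None:
--             if ch == in_quote:
--                 in_quote = None
--             put(ch)
--             continue
--         if ch in ("'", '"'):
--             in_quote = ch
--             put(ch)
--             continue
--         if ch == "(":
--             depth += 1
--         elif ch == ")":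
--             depth -= 1
--         if ch == "," and depth == 0:
--             flush()
--         else:
--             put(ch)
--     if seen_eq or "".join(col).strip():
--         flush()
--     return result
-- ===== Notes on version B (the rewrite author's own statement) =====
-- stated objective: alternative
-- what changed: B replaces A's two-phase split-on-commas-then-index-each-segment-for-'=' parse by a single pass that routes each character into a col or expr buffer (flipping at the first literal '='), flushing a (col.strip(), expr.strip()) pair at each top-level comma and at end of input; Pre_ excludes exactly the inputs on which A raises ValueError (a non-empty top-level segment without '='), where B raises its own descriptive ValueError.
import Mathlib
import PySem

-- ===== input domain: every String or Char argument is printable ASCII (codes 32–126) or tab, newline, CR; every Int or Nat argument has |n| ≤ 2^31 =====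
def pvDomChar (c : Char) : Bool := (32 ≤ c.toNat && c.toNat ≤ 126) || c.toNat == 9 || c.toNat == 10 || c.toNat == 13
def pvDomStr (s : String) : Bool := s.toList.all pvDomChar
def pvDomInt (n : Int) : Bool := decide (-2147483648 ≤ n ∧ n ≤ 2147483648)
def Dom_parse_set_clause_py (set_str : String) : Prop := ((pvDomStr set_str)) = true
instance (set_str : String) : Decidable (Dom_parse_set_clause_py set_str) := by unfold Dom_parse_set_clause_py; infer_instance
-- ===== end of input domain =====

-- B replaces A's split-then-index two-phase parse by a single pass that routes characters
-- into a col/expr buffer pair directly (objective: alternative, same cost).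


-- ===== PORT A =====
-- _split_at_commas: the for-loop as structural recursion over the characters,
-- state = (parts, depth, in_quote, current) exactly as in the Python.
def pvSplitGoA : List Char → List (List Char) → Int → Option Char → List Char → List (List Char)
  | [], parts, _, _, current =>
      if PySem.Chars.strip current ≠ [] then parts ++ [PySem.Chars.strip current] else parts
  | ch :: rest, parts, depth, inq, current =>
    match inq with
    | some q => pvSplitGoA rest parts depth (if ch = q then none else some q) (current ++ [ch])
    | none =>
      if ch = '\'' ∨ ch = '"' then pvSplitGoA rest parts depth (some ch) (current ++ [ch])
      else
        let depth' := if ch = '(' then depth + 1 else if ch = ')' then depth - 1 else depth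
        if ch = ',' ∧ depth' = 0 then pvSplitGoA rest (parts ++ [PySem.Chars.strip current]) depth' none []
        else pvSplitGoA rest parts depth' none (current ++ [ch])

-- one pair: pair.index("=") (ValueError = none), pair[:i].strip(), pair[i+1:].strip()
def pvParsePairA (pair : List Char) : Option (String × String) :=
  let i := PySem.Chars.find pair ['=']
  if i = -1 then none
  else some (String.ofList (PySem.Chars.strip (PySem.List.slice pair none (some i))),
             String.ofList (PySem.Chars.strip (PySem.List.slice pair (some (i + 1)) none)))

-- the result-building for-loop of _parse_set_clause (ValueError propagates as none)
def pvParseLoopA : List (List Char) → Option (List (String × String))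
  | [] => some []
  | p :: ps =>
    match pvParsePairA p with
    | none => none
    | some pr =>
      match pvParseLoopA ps with
      | none => none
      | some rest => some (pr :: rest)

def parse_set_clause_py (set_str : String) : List (String × String) :=
  (pvParseLoopA (pvSplitGoA set_str.toList [] 0 none [])).getD []

-- ===== PORT B =====
-- put(ch): route ch into col or expr, flipping seen_eq at the first literal '='
def pvRouteB (col expr : List Char) (seen : Bool) (ch : Char) : List Char × List Char × Bool :=
  if seen = false ∧ ch = '=' then (col, expr, true)
  else if seen then (col, expr ++ [ch], seen)
  else (col ++ [ch], expr, seen)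

-- the single-pass loop; none = ValueError (flush of a segment without '=')
def pvGoB : List Char → List (String × String) → List Char → List Char → Bool → Int → Option Char →
    Option (List (String × String))
  | [], res, col, expr, seen, _, _ =>
      if seen then
        some (res ++ [(String.ofList (PySem.Chars.strip col), String.ofList (PySem.Chars.strip expr))])
      else if PySem.Chars.strip col ≠ [] then none
      else some res
  | ch :: rest, res, col, expr, seen, depth, inq =>
    match inq with
    | some q =>
      match pvRouteB col expr seen ch with
      | (col', expr', seen') => pvGoB rest res col' expr' seen' depth (if ch = q then none else some q)
    | none =>
      if ch = '\'' ∨ ch = '"' then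
        match pvRouteB col expr seen ch with
        | (col', expr', seen') => pvGoB rest res col' expr' seen' depth (some ch)
      else
        let depth' := if ch = '(' then depth + 1 else if ch = ')' then depth - 1 else depth
        if ch = ',' ∧ depth' = 0 then
          if seen then
            pvGoB rest (res ++ [(String.ofList (PySem.Chars.strip col), String.ofList (PySem.Chars.strip expr))])
              [] [] false depth' none
          else none
        else
          match pvRouteB col expr seen ch with
          | (col', expr', seen') => pvGoB rest res col' expr' seen' depth' none

def parse_set_clause_py_alt (set_str : String) : List (String × String) :=
  (pvGoB set_str.toList [] [] [] false 0 none).getD []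

-- ===== PRECONDITION & SPEC =====
-- an independent description of the top-level comma segments (raw, unstripped)
def pvTopSplit : List Char → Int → Option Char → List Char → List (List Char)
  | [], _, _, cur => [cur]
  | ch :: rest, depth, some q, cur => pvTopSplit rest depth (if ch = q then none else some q) (cur ++ [ch])
  | ch :: rest, depth, none, cur =>
    if ch = '\'' ∨ ch = '"' then pvTopSplit rest depth (some ch) (cur ++ [ch])
    else if ch = ',' ∧ depth = 0 then cur :: pvTopSplit rest depth none []
    else pvTopSplit rest (if ch = '(' then depth + 1 else if ch = ')' then depth - 1 else depth) none (cur ++ [ch])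

def pvSegsOk : List (List Char) → Bool
  | [] => true
  | [seg] => seg.contains '=' || (PySem.Chars.strip seg == [])
  | seg :: rest => seg.contains '=' && pvSegsOk rest

-- Pre_ excludes exactly the inputs on which both programs raise ValueError: some top-level
-- comma segment contains no '=' (for the trailing segment: and does not strip to empty).
def Pre_parse_set_clause_py (set_str : String) : Prop :=
  pvSegsOk (pvTopSplit set_str.toList 0 none []) = true
instance (set_str : String) : Decidable (Pre_parse_set_clause_py set_str) := by
  unfold Pre_parse_set_clause_py; infer_instance

def pvWitness_parse_set_clause_py : String := "a = 1, b = f(2, 3) "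

def Spec_parse_set_clause_py (set_str : String) (out : List (String × String)) : Prop :=
  out = parse_set_clause_py_alt set_str
instance (set_str : String) (out : List (String × String)) : Decidable (Spec_parse_set_clause_py set_str out) := by
  unfold Spec_parse_set_clause_py; infer_instance

-- ===== CLAIM (what is proved, stated in full; the proofs are below) =====
def Claim_equal_parse_set_clause_py : Prop := ∀ (set_str : String), Dom_parse_set_clause_py set_str →
  Pre_parse_set_clause_py set_str → Spec_parse_set_clause_py set_str (parse_set_clause_py set_str)

-- ===== LEMMAS AND PROOFS =====

-- the current buffer of A, reconstructed from B's state
def pvCur (col expr : List Char) (seen : Bool) : List Char :=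
  col ++ (if seen then '=' :: expr else [])

lemma pv_dropWhile_append_cons {p : Char → Bool} {c : Char} (hc : p c = false) (xs ys : List Char) :
    List.dropWhile p (xs ++ c :: ys) = List.dropWhile p xs ++ c :: ys := by
  rw [List.dropWhile_append]
  split
  · next h => simp_all [List.isEmpty_iff]
  · rfl

lemma pv_lstrip_append_cons {c : Char} (hc : PySem.Chars.isspace c = false) (xs ys : List Char) :
    PySem.Chars.lstrip (xs ++ c :: ys) = PySem.Chars.lstrip xs ++ c :: ys := by
  simp [PySem.Chars.lstrip, pv_dropWhile_append_cons hc]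

lemma pv_rstrip_append_cons {c : Char} (hc : PySem.Chars.isspace c = false) (xs ys : List Char) :
    PySem.Chars.rstrip (xs ++ c :: ys) = xs ++ c :: PySem.Chars.rstrip ys := by
  simp [PySem.Chars.rstrip, pv_dropWhile_append_cons hc]

lemma pv_strip_middle {c : Char} (hc : PySem.Chars.isspace c = false) (xs ys : List Char) :
    PySem.Chars.strip (xs ++ c :: ys) =
      PySem.Chars.lstrip xs ++ c :: PySem.Chars.rstrip ys := by
  simp [PySem.Chars.strip, pv_lstrip_append_cons hc, pv_rstrip_append_cons hc]

lemma pv_strip_lstrip (xs : List Char) :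
    PySem.Chars.strip (PySem.Chars.lstrip xs) = PySem.Chars.strip xs := by
  simp [PySem.Chars.strip, PySem.Chars.lstrip, List.dropWhile_idempotent]

lemma pv_strip_rstrip (xs : List Char) :
    PySem.Chars.strip (PySem.Chars.rstrip xs) = PySem.Chars.strip xs := by
  rcases h : List.dropWhile PySem.Chars.isspace xs.reverse with _ | ⟨b, u⟩
  · have hall : ∀ c ∈ xs, PySem.Chars.isspace c = true := fun c hc =>
      List.dropWhile_eq_nil_iff.mp h c (List.mem_reverse.mpr hc)
    have h1 : PySem.Chars.rstrip xs = [] := by simp [PySem.Chars.rstrip, h]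
    have h2 : PySem.Chars.lstrip xs = [] := List.dropWhile_eq_nil_iff.mpr hall
    have h3 : PySem.Chars.strip xs = [] := by
      simp [PySem.Chars.strip, h2, PySem.Chars.rstrip]
    rw [h1, h3]
    rfl
  · have hb : PySem.Chars.isspace b = false := by
      have hne : List.dropWhile PySem.Chars.isspace xs.reverse ≠ [] := by simp [h]
      have := List.head_dropWhile_not PySem.Chars.isspace hne
      simpa [h] using this
    have hsplit := List.takeWhile_append_dropWhile (p := PySem.Chars.isspace) (l := xs.reverse)
    rw [h] at hsplit
    have hxs : xs = u.reverse ++ b :: (List.takeWhile PySem.Chars.isspace xs.reverse).reverse := by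
      conv_lhs => rw [← List.reverse_reverse xs, ← hsplit]
      simp
    have hr : PySem.Chars.rstrip xs = u.reverse ++ b :: ([] : List Char) := by
      simp [PySem.Chars.rstrip, h]
    have hw : List.dropWhile PySem.Chars.isspace (List.takeWhile PySem.Chars.isspace xs.reverse) = [] :=
      List.dropWhile_eq_nil_iff.mpr (fun c hc => List.mem_takeWhile_imp hc)
    have hw' : PySem.Chars.rstrip (List.takeWhile PySem.Chars.isspace xs.reverse).reverse = [] := by
      simp [PySem.Chars.rstrip, hw]
    conv_rhs => rw [hxs]
    rw [hr, pv_strip_middle hb, pv_strip_middle hb, hw']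
    simp [PySem.Chars.rstrip]

lemma pv_mem_lstrip {c : Char} {xs : List Char} (h : c ∈ PySem.Chars.lstrip xs) : c ∈ xs := by
  exact (List.dropWhile_sublist _).mem h

lemma pv_mem_strip {c : Char} {xs : List Char} (h : c ∈ PySem.Chars.strip xs) : c ∈ xs := by
  have h1 : c ∈ PySem.Chars.lstrip xs := by
    have := (List.dropWhile_sublist (l := (PySem.Chars.lstrip xs).reverse) PySem.Chars.isspace).reverse
    simpa [PySem.Chars.strip, PySem.Chars.rstrip] using this.mem h
  exact pv_mem_lstrip h1

lemma pv_find_eq (xs ys : List Char) (h : '=' ∉ xs) :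
    PySem.Chars.find (xs ++ '=' :: ys) ['='] = (xs.length : Int) := by
  have hinf : ['='] <:+: xs ++ '=' :: ys := ⟨xs, ys, by simp⟩
  have h0 : 0 ≤ PySem.Chars.find (xs ++ '=' :: ys) ['='] :=
    (PySem.Chars.find_nonneg_iff _ _).mpr hinf
  obtain ⟨h1, h2⟩ := PySem.Chars.find_spec h0
  set n := (PySem.Chars.find (xs ++ '=' :: ys) ['=']).toNat with hn
  have hle : n ≤ xs.length := by
    by_contra hgt
    rw [Nat.not_le] at hgt
    exact h2 xs.length hgt (by rw [List.drop_left]; exact ⟨ys, rfl⟩)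
  have heq : n = xs.length := by
    rcases Nat.lt_or_ge n xs.length with hlt | hge
    · exfalso
      obtain ⟨t, ht⟩ := h1
      have hget : (xs ++ '=' :: ys)[n]? = some '=' := by
        have h00 : (List.drop n (xs ++ '=' :: ys))[0]? = some '=' := by
          rw [← ht]; rfl
        rw [List.getElem?_drop] at h00
        simpa using h00
      rw [List.getElem?_append_left hlt] at hget
      exact h (List.mem_of_getElem? hget)
    · omega
  have := Int.toNat_of_nonneg h0
  omega

lemma pv_parsePairA_none {p : List Char} (h : '=' ∉ p) : pvParsePairA p = none := by
  have : PySem.Chars.find p ['='] = -1 := by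
    rw [PySem.Chars.find_eq_neg_one_iff]
    intro hinf
    exact h (List.singleton_sublist.mp hinf.sublist)
  simp [pvParsePairA, this]

lemma pv_parsePairA_seg {col expr : List Char} (h : '=' ∉ col) :
    pvParsePairA (PySem.Chars.strip (col ++ '=' :: expr)) =
      some (String.ofList (PySem.Chars.strip col), String.ofList (PySem.Chars.strip expr)) := by
  have hsp : PySem.Chars.isspace '=' = false := by decide
  have h' : '=' ∉ PySem.Chars.lstrip col := fun hm => h (pv_mem_lstrip hm)
  rw [pv_strip_middle hsp]
  unfold pvParsePairA
  rw [pv_find_eq _ _ h']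
  rw [if_neg (by omega)]
  have hL : PySem.List.slice (PySem.Chars.lstrip col ++ '=' :: PySem.Chars.rstrip expr) none
      (some ((PySem.Chars.lstrip col).length : Int)) = PySem.Chars.lstrip col := by
    simp [pysem]
  have hR : PySem.List.slice (PySem.Chars.lstrip col ++ '=' :: PySem.Chars.rstrip expr)
      (some (((PySem.Chars.lstrip col).length : Int) + 1)) none = PySem.Chars.rstrip expr := by
    have hcast : ((PySem.Chars.lstrip col).length : Int) + 1 =
        (((PySem.Chars.lstrip col).length + 1 : Nat) : Int) := by push_cast; ring
    rw [hcast]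
    have hshape : PySem.Chars.lstrip col ++ '=' :: PySem.Chars.rstrip expr =
        (PySem.Chars.lstrip col ++ ['=']) ++ PySem.Chars.rstrip expr := by simp
    simp only [pysem]
    rw [hshape, List.drop_left' (by simp)]
  rw [hL, hR, pv_strip_lstrip, pv_strip_rstrip]

-- accumulator factoring for A's splitter
lemma pv_splitGoA_acc (cs : List Char) :
    ∀ parts depth inq cur, pvSplitGoA cs parts depth inq cur = parts ++ pvSplitGoA cs [] depth inq cur := by
  induction cs with
  | nil =>
    intro parts d q cur
    simp only [pvSplitGoA]
    split <;> simp
  | cons ch rest ih =>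
    intro parts d q cur
    cases q with
    | some qc =>
      simp only [pvSplitGoA]
      exact ih parts d _ _
    | none =>
      simp only [pvSplitGoA]
      split_ifs <;>
        first
          | exact ih parts _ _ _
          | (rw [ih (parts ++ [PySem.Chars.strip cur]), ih ([] ++ [PySem.Chars.strip cur])]; simp)

-- accumulator factoring for B's loop
lemma pv_goB_acc (cs : List Char) :
    ∀ res col expr seen depth inq,
      pvGoB cs res col expr seen depth inq = (pvGoB cs [] col expr seen depth inq).map (res ++ ·) := by
  induction cs with
  | nil =>
    intro res col expr seen d q
    simp only [pvGoB]
    split_ifs <;> simp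
  | cons ch rest ih =>
    intro res col expr seen d q
    rcases hr : pvRouteB col expr seen ch with ⟨c', e', s'⟩
    cases q with
    | some qc =>
      simp only [pvGoB, hr]
      exact ih res _ _ _ d _
    | none =>
      simp only [pvGoB, hr]
      split_ifs
      all_goals try exact ih res _ _ _ _ _
      all_goals try rw [ih (res ++ [(String.ofList (PySem.Chars.strip col), String.ofList (PySem.Chars.strip expr))]),
        ih ([] ++ [(String.ofList (PySem.Chars.strip col), String.ofList (PySem.Chars.strip expr))])]
      all_goals simp [Function.comp_def]

-- routing correctness: put(ch) keeps the reconstruction and the invariants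
lemma pv_route_spec (col expr : List Char) (seen : Bool) (ch : Char)
    (hcol : '=' ∉ col) (hexpr : seen = false → expr = []) :
    pvCur col expr seen ++ [ch] =
      pvCur (pvRouteB col expr seen ch).1 (pvRouteB col expr seen ch).2.1 (pvRouteB col expr seen ch).2.2 ∧
    '=' ∉ (pvRouteB col expr seen ch).1 ∧
    ((pvRouteB col expr seen ch).2.2 = false → (pvRouteB col expr seen ch).2.1 = []) := by
  cases seen with
  | true =>
    have hr : pvRouteB col expr true ch = (col, expr ++ [ch], true) := by simp [pvRouteB]
    rw [hr]
    exact ⟨by simp [pvCur], hcol, by simp⟩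
  | false =>
    by_cases he : ch = '='
    · subst he
      have hr : pvRouteB col expr false '=' = (col, expr, true) := by simp [pvRouteB]
      rw [hr, hexpr rfl]
      exact ⟨by simp [pvCur], hcol, by simp⟩
    · have hr : pvRouteB col expr false ch = (col ++ [ch], expr, false) := by simp [pvRouteB, he]
      rw [hr]
      refine ⟨by simp [pvCur], ?_, fun _ => hexpr rfl⟩
      simp only [List.mem_append, List.mem_singleton]
      rintro (hm | hm)
      · exact hcol hm
      · exact he hm.symm

-- the main invariant: A's remaining computation equals B's, from any aligned state
lemma pv_main (cs : List Char) :
    ∀ col expr seen depth inq, '=' ∉ col → (seen = false → expr = []) →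
      pvParseLoopA (pvSplitGoA cs [] depth inq (pvCur col expr seen)) =
        pvGoB cs [] col expr seen depth inq := by
  induction cs with
  | nil =>
    intro col expr seen d q hcol hexpr
    cases seen with
    | true =>
      have hsp : PySem.Chars.isspace '=' = false := by decide
      have hcur : pvCur col expr true = col ++ '=' :: expr := by simp [pvCur]
      have hne : PySem.Chars.strip (col ++ '=' :: expr) ≠ [] := by
        rw [pv_strip_middle hsp]; simp
      rw [hcur]
      simp only [pvSplitGoA, if_pos hne, List.nil_append]
      simp [pvParseLoopA, pv_parsePairA_seg hcol, pvGoB]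
    | false =>
      have hcur : pvCur col expr false = col := by simp [pvCur]
      rw [hcur]
      by_cases hne : PySem.Chars.strip col = []
      · simp [pvSplitGoA, hne, pvParseLoopA, pvGoB]
      · have hno : '=' ∉ PySem.Chars.strip col := fun hm => hcol (pv_mem_strip hm)
        simp only [pvSplitGoA, if_pos hne, List.nil_append]
        simp [pvParseLoopA, pv_parsePairA_none hno, pvGoB, hne]
  | cons ch rest ih =>
    intro col expr seen d q hcol hexpr
    obtain ⟨h1, h2, h3⟩ := pv_route_spec col expr seen ch hcol hexpr
    rcases hr : pvRouteB col expr seen ch with ⟨c', e', s'⟩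
    rw [hr] at h1 h2 h3
    cases q with
    | some qc =>
      simp only [pvSplitGoA, pvGoB, hr]
      rw [h1]
      exact ih c' e' s' d _ h2 h3
    | none =>
      by_cases hq : ch = '\'' ∨ ch = '"'
      · simp only [pvSplitGoA, pvGoB, if_pos hq, hr]
        rw [h1]
        exact ih c' e' s' d _ h2 h3
      · simp only [pvSplitGoA, pvGoB, if_neg hq, hr]
        set d' := if ch = '(' then d + 1 else if ch = ')' then d - 1 else d with hd'
        by_cases hc : ch = ',' ∧ d' = 0
        · rw [if_pos hc, if_pos hc]
          have hih := ih [] [] false d' none (by simp) (fun _ => rfl)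
          simp only [pvCur, Bool.false_eq_true, if_neg (by simp : ¬(False : Prop)), List.append_nil] at hih
          cases seen with
          | true =>
            have hcur : pvCur col expr true = col ++ '=' :: expr := by simp [pvCur]
            rw [if_pos rfl, List.nil_append, pv_splitGoA_acc, pv_goB_acc, hcur]
            rw [List.singleton_append]
            simp only [pvParseLoopA, pv_parsePairA_seg hcol]
            rw [hih]
            cases pvGoB rest [] [] [] false d' none <;> simp
          | false =>
            rw [if_neg (by simp : ¬(false = true))]
            have hcur : pvCur col expr false = col := by simp [pvCur]
            rw [hcur, List.nil_append, pv_splitGoA_acc]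
            have hno : '=' ∉ PySem.Chars.strip col := fun hm => hcol (pv_mem_strip hm)
            simp [pvParseLoopA, pv_parsePairA_none hno]
        · rw [if_neg hc, if_neg hc]
          rw [h1]
          exact ih c' e' s' d' none h2 h3

-- ===== VERDICT (by name: the statement is the Claim_ definition above) =====
theorem parse_set_clause_py_spec : Claim_equal_parse_set_clause_py := by
  intro s _ _
  unfold Spec_parse_set_clause_py parse_set_clause_py parse_set_clause_py_alt
  have := pv_main s.toList [] [] false 0 none (by simp) (by simp)
  simp only [pvCur, if_neg (by simp : ¬(false = true)), List.append_nil] at this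
  rw [this]
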